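-- pv_equiv track=rewrite | github.com/nawedy/AI-Guardian-Enhanced | ai-guardian-production-complete/backend/code-scanner/code-scanner-service/src/ai_features/natural_language_processor.py | _generate_vulnerability_recommendations
-- ===== SOURCE A (Python) =====
-- from typing import Dict, List, Any, Optional, Tuple
--
-- def _generate_vulnerability_recommendations(vulnerabilities: List[Dict]) -> List[str]:
--     """Generate recommendations based on found vulnerabilities"""
--     recommendations = []
--
--     if not vulnerabilities:
--         return ["No specific recommendations - no vulnerabilities found"]
--
--     # Analyze vulnerability types
--     vuln_types = [v.get('type', '').lower() for v in vulnerabilities]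
--
--     if any('sql' in vtype for vtype in vuln_types):
--         recommendations.append("Implement parameterized queries to prevent SQL injection")
--
--     if any('xss' in vtype for vtype in vuln_types):
--         recommendations.append("Use proper output encoding and Content Security Policy")
--
--     if any('secret' in vtype or 'password' in vtype for vtype in vuln_types):
--         recommendations.append("Move secrets to environment variables or secure vaults")
--
--     # General recommendations
--     recommendations.extend([
--         "Conduct regular security code reviews",
--         "Implement automated security testing in CI/CD pipeline",
--         "Keep dependencies updated and monitor for vulnerabilities"
--     ])
--
--     return recommendations[:5]  # Limit to top 5
-- ===== SOURCE B (Python) =====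
-- _R_SQL = "Implement parameterized queries to prevent SQL injection"
-- _R_XSS = "Use proper output encoding and Content Security Policy"
-- _R_SEC = "Move secrets to environment variables or secure vaults"
-- _G1 = "Conduct regular security code reviews"
-- _G2 = "Implement automated security testing in CI/CD pipeline"
-- _G3 = "Keep dependencies updated and monitor for vulnerabilities"
--
-- # All 8 possible outputs, already limited to 5, indexed by mask (1=sql, 2=xss, 4=secret/password).
-- _REC_TABLE = [
--     [_G1, _G2, _G3],                     # 0
--     [_R_SQL, _G1, _G2, _G3],             # 1
--     [_R_XSS, _G1, _G2, _G3],             # 2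
--     [_R_SQL, _R_XSS, _G1, _G2, _G3],     # 3
--     [_R_SEC, _G1, _G2, _G3],             # 4
--     [_R_SQL, _R_SEC, _G1, _G2, _G3],     # 5
--     [_R_XSS, _R_SEC, _G1, _G2, _G3],     # 6
--     [_R_SQL, _R_XSS, _R_SEC, _G1, _G2],  # 7 (all three: 6 candidates, top 5 kept)
-- ]
--
-- def _generate_vulnerability_recommendations(vulnerabilities):
--     """Accumulate a 3-bit mask of finding categories, then look the answer up in a table."""
--     if not vulnerabilities:
--         return ["No specific recommendations - no vulnerabilities found"]
--     mask = 0
--     for v in vulnerabilities: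
--         t = v.get('type', '').lower()
--         if 'sql' in t:
--             mask |= 1
--         if 'xss' in t:
--             mask |= 2
--         if 'secret' in t or 'password' in t:
--             mask |= 4
--     return list(_REC_TABLE[mask])
-- ===== Notes on version B (the rewrite author's own statement) =====
-- stated objective: alternative
-- what changed: Replaces the three any() scans and the append/extend/[:5] assembly with a single loop that ORs category bits into a 3-bit mask and a precomputed 8-entry lookup table of the already-truncated recommendation lists.
import Mathlib
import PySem

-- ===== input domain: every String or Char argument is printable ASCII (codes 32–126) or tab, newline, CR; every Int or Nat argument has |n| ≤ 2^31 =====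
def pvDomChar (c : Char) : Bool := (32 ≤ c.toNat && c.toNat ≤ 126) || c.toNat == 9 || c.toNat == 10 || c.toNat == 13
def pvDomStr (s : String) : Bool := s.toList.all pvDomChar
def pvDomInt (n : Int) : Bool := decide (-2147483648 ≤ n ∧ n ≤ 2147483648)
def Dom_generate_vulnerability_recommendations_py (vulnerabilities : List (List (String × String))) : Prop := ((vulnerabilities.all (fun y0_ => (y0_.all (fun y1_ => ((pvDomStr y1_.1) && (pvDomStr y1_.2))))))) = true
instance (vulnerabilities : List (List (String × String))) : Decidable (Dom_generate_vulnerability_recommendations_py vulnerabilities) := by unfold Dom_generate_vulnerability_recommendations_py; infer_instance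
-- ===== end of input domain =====

-- B accumulates a 3-bit category mask in one loop and returns a precomputed 8-entry lookup table row (alternative decomposition, same cost).

-- ===== PORT A =====
def generate_vulnerability_recommendations_py (vulnerabilities : List (List (String × String))) : List String :=
  if vulnerabilities = [] then
    ["No specific recommendations - no vulnerabilities found"]
  else
    let vuln_types := vulnerabilities.map (fun v => PySem.Str.lower ((PySem.Dict.mk v).getD "type" ""))
    let recommendations : List String := []
    let recommendations :=
      if vuln_types.any (fun t => PySem.Str.isIn "sql" t) then
        recommendations ++ ["Implement parameterized queries to prevent SQL injection"]
      else recommendations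
    let recommendations :=
      if vuln_types.any (fun t => PySem.Str.isIn "xss" t) then
        recommendations ++ ["Use proper output encoding and Content Security Policy"]
      else recommendations
    let recommendations :=
      if vuln_types.any (fun t => PySem.Str.isIn "secret" t || PySem.Str.isIn "password" t) then
        recommendations ++ ["Move secrets to environment variables or secure vaults"]
      else recommendations
    let recommendations := recommendations ++
      ["Conduct regular security code reviews",
       "Implement automated security testing in CI/CD pipeline",
       "Keep dependencies updated and monitor for vulnerabilities"]
    PySem.List.slice recommendations none (some 5)

-- ===== PORT B =====
-- the 8-row precomputed table of Source B (_REC_TABLE), indexed by the mask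
def pvRecTable (mask : Nat) : List String :=
  match mask with
  | 0 => ["Conduct regular security code reviews",
          "Implement automated security testing in CI/CD pipeline",
          "Keep dependencies updated and monitor for vulnerabilities"]
  | 1 => ["Implement parameterized queries to prevent SQL injection",
          "Conduct regular security code reviews",
          "Implement automated security testing in CI/CD pipeline",
          "Keep dependencies updated and monitor for vulnerabilities"]
  | 2 => ["Use proper output encoding and Content Security Policy",
          "Conduct regular security code reviews",
          "Implement automated security testing in CI/CD pipeline",
          "Keep dependencies updated and monitor for vulnerabilities"]
  | 3 => ["Implement parameterized queries to prevent SQL injection",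
          "Use proper output encoding and Content Security Policy",
          "Conduct regular security code reviews",
          "Implement automated security testing in CI/CD pipeline",
          "Keep dependencies updated and monitor for vulnerabilities"]
  | 4 => ["Move secrets to environment variables or secure vaults",
          "Conduct regular security code reviews",
          "Implement automated security testing in CI/CD pipeline",
          "Keep dependencies updated and monitor for vulnerabilities"]
  | 5 => ["Implement parameterized queries to prevent SQL injection",
          "Move secrets to environment variables or secure vaults",
          "Conduct regular security code reviews",
          "Implement automated security testing in CI/CD pipeline",
          "Keep dependencies updated and monitor for vulnerabilities"]
  | 6 => ["Use proper output encoding and Content Security Policy",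
          "Move secrets to environment variables or secure vaults",
          "Conduct regular security code reviews",
          "Implement automated security testing in CI/CD pipeline",
          "Keep dependencies updated and monitor for vulnerabilities"]
  | _ => ["Implement parameterized queries to prevent SQL injection",
          "Use proper output encoding and Content Security Policy",
          "Move secrets to environment variables or secure vaults",
          "Conduct regular security code reviews",
          "Implement automated security testing in CI/CD pipeline"]

def generate_vulnerability_recommendations_py_alt (vulnerabilities : List (List (String × String))) : List String :=
  if vulnerabilities = [] then
    ["No specific recommendations - no vulnerabilities found"]
  else
    let mask := vulnerabilities.foldl
      (fun (m : Nat) v =>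
        let t := PySem.Str.lower ((PySem.Dict.mk v).getD "type" "")
        let m := if PySem.Str.isIn "sql" t then m ||| 1 else m
        let m := if PySem.Str.isIn "xss" t then m ||| 2 else m
        if PySem.Str.isIn "secret" t || PySem.Str.isIn "password" t then m ||| 4 else m)
      0
    pvRecTable mask

-- ===== PRECONDITION & SPEC =====
def Spec_generate_vulnerability_recommendations_py (vulnerabilities : List (List (String × String))) (out : List String) : Prop := out = generate_vulnerability_recommendations_py_alt vulnerabilities
instance (vulnerabilities : List (List (String × String))) (out : List String) : Decidable (Spec_generate_vulnerability_recommendations_py vulnerabilities out) := by unfold Spec_generate_vulnerability_recommendations_py; infer_instance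

-- ===== CLAIM (what is proved, stated in full; the proofs are below) =====
def Claim_equal_generate_vulnerability_recommendations_py : Prop := ∀ (vulnerabilities : List (List (String × String))), Dom_generate_vulnerability_recommendations_py vulnerabilities → Spec_generate_vulnerability_recommendations_py vulnerabilities (generate_vulnerability_recommendations_py vulnerabilities)

-- ===== LEMMAS AND PROOFS =====

-- mask encoding of three booleans
def pvEnc (s x c : Bool) : Nat :=
  (if s then 1 else 0) ||| (if x then 2 else 0) ||| (if c then 4 else 0)

theorem pvEnc_or (s x c s' x' c' : Bool) :
    pvEnc s x c ||| pvEnc s' x' c' = pvEnc (s || s') (x || x') (c || c') := by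
  cases s <;> cases x <;> cases c <;> cases s' <;> cases x' <;> cases c' <;> decide

-- one element's contribution to the mask is the encoding of its three bits
theorem pv_step_enc (m : Nat) (s x c : Bool) :
    (if c then (if x then (if s then m ||| 1 else m) ||| 2 else (if s then m ||| 1 else m)) ||| 4
     else (if x then (if s then m ||| 1 else m) ||| 2 else (if s then m ||| 1 else m)))
    = m ||| pvEnc s x c := by
  cases s <;> cases x <;> cases c <;> simp [pvEnc, Nat.or_assoc]

-- the mask fold of B computes exactly the encoding of A's three any-scans
theorem pv_mask_eq (l : List (List (String × String))) (m : Nat) :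
    l.foldl
      (fun (m : Nat) v =>
        let t := PySem.Str.lower ((PySem.Dict.mk v).getD "type" "")
        let m := if PySem.Str.isIn "sql" t then m ||| 1 else m
        let m := if PySem.Str.isIn "xss" t then m ||| 2 else m
        if PySem.Str.isIn "secret" t || PySem.Str.isIn "password" t then m ||| 4 else m)
      m
    = m ||| pvEnc
        ((l.map (fun v => PySem.Str.lower ((PySem.Dict.mk v).getD "type" ""))).any
          (fun t => PySem.Str.isIn "sql" t))
        ((l.map (fun v => PySem.Str.lower ((PySem.Dict.mk v).getD "type" ""))).any
          (fun t => PySem.Str.isIn "xss" t))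
        ((l.map (fun v => PySem.Str.lower ((PySem.Dict.mk v).getD "type" ""))).any
          (fun t => PySem.Str.isIn "secret" t || PySem.Str.isIn "password" t)) := by
  induction l generalizing m with
  | nil => simp [pvEnc]
  | cons v tl ih =>
    simp only [List.foldl_cons, List.map_cons, List.any_cons]
    rw [show (let t := PySem.Str.lower ((PySem.Dict.mk v).getD "type" "")
        let m := if PySem.Str.isIn "sql" t then m ||| 1 else m
        let m := if PySem.Str.isIn "xss" t then m ||| 2 else m
        if PySem.Str.isIn "secret" t || PySem.Str.isIn "password" t then m ||| 4 else m)
        = m ||| pvEnc (PySem.Str.isIn "sql" (PySem.Str.lower ((PySem.Dict.mk v).getD "type" "")))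
            (PySem.Str.isIn "xss" (PySem.Str.lower ((PySem.Dict.mk v).getD "type" "")))
            (PySem.Str.isIn "secret" (PySem.Str.lower ((PySem.Dict.mk v).getD "type" ""))
              || PySem.Str.isIn "password" (PySem.Str.lower ((PySem.Dict.mk v).getD "type" "")))
        from pv_step_enc m _ _ _]
    rw [ih, Nat.or_assoc, pvEnc_or]

-- ===== VERDICT (by name: the statement is the Claim_ definition above) =====
theorem generate_vulnerability_recommendations_py_spec : Claim_equal_generate_vulnerability_recommendations_py := by
  intro vulns _
  unfold Spec_generate_vulnerability_recommendations_py
    generate_vulnerability_recommendations_py generate_vulnerability_recommendations_py_alt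
  by_cases h : vulns = []
  · simp [h]
  · simp only [if_neg h, pv_mask_eq, Nat.zero_or]
    cases hs : (vulns.map (fun v => PySem.Str.lower ((PySem.Dict.mk v).getD "type" ""))).any
        (fun t => PySem.Str.isIn "sql" t) <;>
      cases hx : (vulns.map (fun v => PySem.Str.lower ((PySem.Dict.mk v).getD "type" ""))).any
        (fun t => PySem.Str.isIn "xss" t) <;>
      cases hc : (vulns.map (fun v => PySem.Str.lower ((PySem.Dict.mk v).getD "type" ""))).any
        (fun t => PySem.Str.isIn "secret" t || PySem.Str.isIn "password" t) <;>
      simp [pvEnc, pvRecTable, PySem.List.slice_to]
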